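-- pv_equiv track=rewrite | github.com/DanMayhem/project_euler | 111.py | _fill_candidate
-- ===== SOURCE A (Python) =====
-- def _fill_candidate(c, n, d):
--   """
--     return every combination of the candidate c, padded
--     to length n with digit d
--   """
--   if n == 0:
--     yield c
--     return
--   for i in range(len(c)+1):
--     if not(i > 0 and c[i-1]==d):
--         cc = c[:i]+d+c[i:]
--         for x in _fill_candidate(cc, n-1, d):
--           yield x
-- ===== SOURCE B (Python) =====
-- def _fill_candidate(c, n, d):
--     """
--       return every combination of the candidate c, padded
--       to length n with digit d
--     """
--     level = [c]
--     for _ in range(n):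
--         level = [s[:i] + d + s[i:]
--                  for s in level
--                  for i in range(len(s) + 1)
--                  if not (i > 0 and s[i - 1] == d)]
--     yield from level
-- ===== Notes on version B (the rewrite author's own statement) =====
-- stated objective: simpler
-- what changed: Replaces A's DFS generator recursion by an iterative breadth-first level expansion: keep a list of current strings and, n times, rebuild it with one comprehension inserting d at every admissible position; leaf order and duplicates are identical.
import Mathlib
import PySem

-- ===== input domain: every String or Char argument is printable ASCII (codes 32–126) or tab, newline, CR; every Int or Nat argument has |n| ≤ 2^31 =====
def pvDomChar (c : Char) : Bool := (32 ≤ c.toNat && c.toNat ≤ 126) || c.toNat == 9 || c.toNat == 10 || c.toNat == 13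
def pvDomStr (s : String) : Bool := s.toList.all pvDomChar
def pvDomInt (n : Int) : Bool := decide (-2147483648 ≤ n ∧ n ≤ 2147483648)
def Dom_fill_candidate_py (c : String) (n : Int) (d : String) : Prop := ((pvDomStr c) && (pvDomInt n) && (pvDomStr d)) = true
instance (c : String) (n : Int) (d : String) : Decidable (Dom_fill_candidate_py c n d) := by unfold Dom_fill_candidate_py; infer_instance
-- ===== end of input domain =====

-- B replaces A's DFS recursion by an iterative breadth-first level expansion (repeat n times:
-- expand every string of the current level at all admissible insertion points); same output
-- list, including A's genuine duplicates and their order (objective: simpler).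
-- Ports work on List Char; c[:i]+d+c[i:] for a Nat index i is take/drop
-- (PySem.List.slice_to_natCast / slice_from_natCast) and c[i-1] with 0 < i ≤ len c is
-- getD (i-1) (PySem.List.pyGetD_natCast; index always in range under the 0 < i guard),
-- so these are exact on every admitted input.

-- ===== PORT A =====
-- A with fuel n.toNat: Python's recursion decreases n by 1 until n == 0; for n < 0 it never
-- reaches the base case and raises RecursionError, which Pre_ (0 ≤ n) excludes.
def pvFillA (d : List Char) : Nat → List Char → List (List Char)
  | 0, cs => [cs]
  | k + 1, cs =>
      (List.range (cs.length + 1)).flatMap fun i =>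
        if 0 < i ∧ [cs.getD (i - 1) ' '] = d then []
        else pvFillA d k (cs.take i ++ d ++ cs.drop i)

def fill_candidate_py (c : String) (n : Int) (d : String) : List String :=
  (pvFillA d.toList n.toNat c.toList).map String.ofList

-- ===== PORT B =====
-- one level-expansion step: the list comprehension of Source B
def pvStep (d : List Char) (level : List (List Char)) : List (List Char) :=
  level.flatMap fun s =>
    (List.range (s.length + 1)).filterMap fun i =>
      if 0 < i ∧ [s.getD (i - 1) ' '] = d then none
      else some (s.take i ++ d ++ s.drop i)

-- the 'for _ in range(n)' loop of Source B
def pvIter (d : List Char) : Nat → List (List Char) → List (List Char)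
  | 0, level => level
  | k + 1, level => pvIter d k (pvStep d level)

def fill_candidate_py_alt (c : String) (n : Int) (d : String) : List String :=
  (pvIter d.toList n.toNat [c.toList]).map String.ofList

-- ===== PRECONDITION & SPEC =====
-- Pre_ excludes n < 0, where A's recursion never reaches its base case (RecursionError).
def Pre_fill_candidate_py (c : String) (n : Int) (d : String) : Prop := 0 ≤ n
instance (c : String) (n : Int) (d : String) : Decidable (Pre_fill_candidate_py c n d) := by
  unfold Pre_fill_candidate_py; infer_instance

def pvWitness_fill_candidate_py : String × Int × String := ("56", 1, "3")

def Spec_fill_candidate_py (c : String) (n : Int) (d : String) (out : List String) : Prop :=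
  out = fill_candidate_py_alt c n d
instance (c : String) (n : Int) (d : String) (out : List String) : Decidable (Spec_fill_candidate_py c n d out) := by
  unfold Spec_fill_candidate_py; infer_instance

-- ===== CLAIM (what is proved, stated in full; the proofs are below) =====
def Claim_equal_fill_candidate_py : Prop := ∀ (c : String) (n : Int) (d : String), Dom_fill_candidate_py c n d → Pre_fill_candidate_py c n d → Spec_fill_candidate_py c n d (fill_candidate_py c n d)


-- ===== LEMMAS AND PROOFS =====

-- A comprehension with an 'if' filter (filterMap) flat-mapped equals the fused flatMap.
theorem pvFlatMap_filterMap {α β γ : Type} (h : α → Option β) (f : β → List γ) (xs : List α) :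
    (xs.filterMap h).flatMap f = xs.flatMap fun a => (h a).elim [] f := by
  induction xs with
  | nil => rfl
  | cons a xs ih =>
      cases hh : h a <;>
        simp [hh, List.flatMap_cons, ih, Option.elim]

-- Main invariant: DFS-expanding each string of a level k levels deep, in order, is the same
-- as iterating the breadth-first step k times on the level.
theorem pvMain (d : List Char) (k : Nat) : ∀ (L : List (List Char)),
    L.flatMap (fun cs => pvFillA d k cs) = pvIter d k L := by
  induction k with
  | zero => intro L; simp [pvFillA, pvIter]
  | succ k ih =>
      intro L
      rw [pvIter, ← ih (pvStep d L)]
      unfold pvStep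
      rw [List.flatMap_assoc]
      apply List.flatMap_congr
      intro cs _
      rw [pvFlatMap_filterMap]
      simp only [pvFillA]
      apply List.flatMap_congr
      intro i _
      split <;> simp [Option.elim]

-- ===== VERDICT (by name: the statement is the Claim_ definition above) =====
theorem fill_candidate_py_spec : Claim_equal_fill_candidate_py := by
  intro c n d _ _
  unfold Spec_fill_candidate_py fill_candidate_py fill_candidate_py_alt
  rw [← pvMain d.toList n.toNat [c.toList]]
  simp
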